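-- pv_equiv track=rewrite | github.com/Chafuyee/Universal-Cybrex | Lab01/Lab01_Q5.py | trim_list
-- ===== SOURCE A (Python) =====
-- def trim_list(int_list):
--     #Check if all values are equal
--     first_iteration = True
--     is_same = True
--     for number in int_list:
--         if is_same == True:
--             if first_iteration == True:
--                 checker = number
--                 first_iteration = False
--             else:
--                 is_same = checker == number
--     #Edit the list
--     if is_same == True:
--         return int_list
--     else:
--         max_value = max(int_list)
--         max_value_list = [value for value in int_list if (value == max_value)]
--         max_occurence = len(max_value_list)
--         excluding_list = [value for value in int_list if (value != max_value)]
--         second_max_value = max(excluding_list)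
--         for index in range(len(int_list)):
--             if int_list[index] == max_value:
--                 int_list[index] = second_max_value
--         return int_list
-- ===== SOURCE B (Python) =====
-- def trim_list(int_list):
--     # One pass computes the max and the second-distinct max; no pre-scan for
--     # all-equal, no comprehensions. (A mutates int_list in place; B builds a
--     # new list -- the proved equivalence is about the return value.)
--     mx = None
--     second = None
--     for v in int_list:
--         if mx is None or v > mx:
--             second = mx
--             mx = v
--         elif v < mx and (second is None or v > second):
--             second = v
--     if second is None:
--         return int_list
--     return [second if v == mx else v for v in int_list]
-- ===== Notes on version B (the rewrite author's own statement) =====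
-- stated objective: simpler
-- what changed: A's separate all-equal pre-scan plus two comprehension-based max scans are replaced by a single pass that tracks the running max and the running second-distinct max; the all-equal / single-value case falls out as 'second is None', and the result is built with one comprehension instead of in-place index assignment.
import Mathlib
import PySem

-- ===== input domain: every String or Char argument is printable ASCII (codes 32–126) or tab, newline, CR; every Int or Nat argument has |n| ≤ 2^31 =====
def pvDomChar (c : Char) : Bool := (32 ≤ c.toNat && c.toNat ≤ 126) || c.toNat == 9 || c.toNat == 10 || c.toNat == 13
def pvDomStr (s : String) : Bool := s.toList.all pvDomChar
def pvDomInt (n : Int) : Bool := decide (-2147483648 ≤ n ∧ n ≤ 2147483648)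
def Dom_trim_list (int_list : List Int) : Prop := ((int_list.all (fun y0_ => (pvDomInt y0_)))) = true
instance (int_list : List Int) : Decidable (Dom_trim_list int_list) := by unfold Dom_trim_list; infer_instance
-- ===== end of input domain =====

-- B replaces A's all-equal pre-scan and two comprehension max-scans by one pass tracking
-- (max, second-max); A mutates int_list in place while B builds a new list — the
-- equivalence proved here is about the return value only.


-- ===== PORT A =====
-- loop state = (first_iteration, is_same, checker); checker starts uninitialised in
-- Python and is only read after the first iteration, so the initial 0 is never used.
def trim_list (int_list : List Int) : List Int :=
  let st := int_list.foldl
    (fun (s : Bool × Bool × Int) number =>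
      if s.2.1 then
        if s.1 then (false, s.2.1, number)
        else (s.1, s.2.2 == number, s.2.2)
      else s)
    (true, true, 0)
  if st.2.1 then int_list
  else
    -- max() raises on an empty list in Python; this branch is only reached with at
    -- least two distinct elements, so the .getD 0 defaults are never used.
    let max_value := (PySem.List.max? int_list (fun v => v)).getD 0
    let max_value_list := int_list.filter (fun value => value == max_value)
    let _max_occurence := max_value_list.length
    let excluding_list := int_list.filter (fun value => value != max_value)
    let second_max_value := (PySem.List.max? excluding_list (fun v => v)).getD 0
    (PySem.List.pyRange 0 (int_list.length : Int) 1).foldl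
      (fun acc index =>
        if PySem.List.pyGetD acc index 0 == max_value then acc.set index.toNat second_max_value
        else acc)
      int_list

-- ===== PORT B =====
-- loop state = (mx, second) : running max and running max of elements strictly below it
def trim_list_alt (int_list : List Int) : List Int :=
  let st := int_list.foldl
    (fun (s : Option Int × Option Int) v =>
      match s with
      | (none, _) => (some v, none)
      | (some m, second) =>
        if m < v then (some v, some m)
        else if v < m && (match second with | none => true | some s2 => s2 < v) then
          (some m, some v)
        else (some m, second))
    (none, none)
  match st with
  | (mx, some s2) => int_list.map (fun v => if v == mx.getD 0 then s2 else v)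
  | (_, none) => int_list

-- ===== PRECONDITION & SPEC =====
def Spec_trim_list (int_list : List Int) (out : List Int) : Prop := out = trim_list_alt int_list
instance (int_list : List Int) (out : List Int) : Decidable (Spec_trim_list int_list out) := by unfold Spec_trim_list; infer_instance

-- ===== CLAIM (what is proved, stated in full; the proofs are below) =====
def Claim_equal_trim_list : Prop := ∀ (int_list : List Int), Dom_trim_list int_list → Spec_trim_list int_list (trim_list int_list)

-- ===== LEMMAS AND PROOFS =====

-- A's first loop: starting after the first element a with is_same still true,
-- the final flag records whether every later element equals a.
theorem pvA_sticky (t : List Int) (a : Int) :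
    t.foldl
      (fun (s : Bool × Bool × Int) number =>
        if s.2.1 then
          if s.1 then (false, s.2.1, number)
          else (s.1, s.2.2 == number, s.2.2)
        else s)
      (false, false, a)
    = (false, false, a) := by
  induction t with
  | nil => rfl
  | cons b t ih => simpa using ih

theorem pvA_fold_char (t : List Int) (a : Int) :
    t.foldl
      (fun (s : Bool × Bool × Int) number =>
        if s.2.1 then
          if s.1 then (false, s.2.1, number)
          else (s.1, s.2.2 == number, s.2.2)
        else s)
      (false, true, a)
    = (false, decide (∀ x ∈ t, x = a), a) := by
  induction t with
  | nil => simp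
  | cons b t ih =>
    simp only [List.foldl_cons, reduceIte]
    by_cases hb : a = b
    · subst hb; simpa using ih
    · have hba : (a == b) = false := by simp [hb]
      rw [hba, if_neg (by simp : ¬(false = true)), pvA_sticky]
      simp only [List.mem_cons, Prod.mk.injEq]
      refine ⟨trivial, ?_, trivial⟩
      symm
      simp only [decide_eq_false_iff_not, not_forall]
      exact ⟨b, by simp [Ne.symm hb]⟩

-- sticky-false for A's loop is inlined above; B's loop invariant:
def pvInvB (l : List Int) (st : Option Int × Option Int) : Prop :=
  match st with
  | (none, none) => l = []
  | (some m, none) => l ≠ [] ∧ ∀ x ∈ l, x = m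
  | (some m, some s) => m ∈ l ∧ s ∈ l ∧ s < m ∧ (∀ x ∈ l, x ≤ m) ∧ (∀ x ∈ l, x ≠ m → x ≤ s)
  | (none, some _) => False

def pvStepB : (Option Int × Option Int) → Int → (Option Int × Option Int) := fun s v =>
  match s with
  | (none, _) => (some v, none)
  | (some m, second) =>
    if m < v then (some v, some m)
    else if v < m && (match second with | none => true | some s2 => s2 < v) then
      (some m, some v)
    else (some m, second)

theorem pvStepB_inv (p : List Int) (v : Int) (st : Option Int × Option Int)
    (h : pvInvB p st) : pvInvB (p ++ [v]) (pvStepB st v) := by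
  obtain ⟨mx, sec⟩ := st
  cases mx with
  | none =>
    cases sec with
    | none => simp_all [pvInvB, pvStepB]
    | some s => simp_all [pvInvB]
  | some m =>
    cases sec with
    | none =>
      obtain ⟨hne, hall⟩ := h
      have hm : m ∈ p := by
        cases p with
        | nil => exact absurd rfl hne
        | cons c q => have := hall c (by simp); simp [← this]
      simp only [pvStepB]
      split_ifs with h1 h2
      · refine ⟨by simp, by simp [hm], h1, ?_, ?_⟩
        · intro x hx; rcases List.mem_append.1 hx with hx | hx
          · have := hall x hx; omega
          · simp at hx; omega
        · intro x hx hne'; rcases List.mem_append.1 hx with hx | hx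
          · have := hall x hx; omega
          · simp at hx; omega
      · simp only [Bool.and_eq_true, decide_eq_true_eq] at h2
        refine ⟨by simp [hm], by simp, h2.1, ?_, ?_⟩
        · intro x hx; rcases List.mem_append.1 hx with hx | hx
          · have := hall x hx; omega
          · simp at hx; omega
        · intro x hx hne'; rcases List.mem_append.1 hx with hx | hx
          · have := hall x hx; simp_all
          · simp at hx; omega
      · simp only [Bool.and_eq_true, decide_eq_true_eq, not_and] at h2
        have hvm : v = m := by
          rcases lt_trichotomy v m with hv | hv | hv
          · exact absurd trivial (by simpa using h2 hv)
          · exact hv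
          · omega
        refine ⟨by simp, ?_⟩
        intro x hx; rcases List.mem_append.1 hx with hx | hx
        · exact hall x hx
        · simp at hx; omega
    | some s =>
      obtain ⟨hm, hs, hsm, hle, hsec⟩ := h
      simp only [pvStepB]
      split_ifs with h1 h2
      · refine ⟨by simp, by simp [hm], h1, ?_, ?_⟩
        · intro x hx; rcases List.mem_append.1 hx with hx | hx
          · have := hle x hx; omega
          · simp at hx; omega
        · intro x hx hne'; rcases List.mem_append.1 hx with hx | hx
          · exact hle x hx
          · simp at hx; omega
      · simp only [Bool.and_eq_true, decide_eq_true_eq] at h2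
        refine ⟨by simp [hm], by simp, h2.1, ?_, ?_⟩
        · intro x hx; rcases List.mem_append.1 hx with hx | hx
          · exact hle x hx
          · simp at hx; omega
        · intro x hx hne'; rcases List.mem_append.1 hx with hx | hx
          · have := hsec x hx hne'; omega
          · simp at hx; omega
      · simp only [Bool.and_eq_true, decide_eq_true_eq, not_and] at h2
        refine ⟨by simp [hm], by simp [hs], hsm, ?_, ?_⟩
        · intro x hx; rcases List.mem_append.1 hx with hx | hx
          · exact hle x hx
          · simp at hx; omega
        · intro x hx hne'; rcases List.mem_append.1 hx with hx | hx
          · exact hsec x hx hne'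
          · simp at hx
            by_cases hv : v < m
            · have := h2 hv; simp at this; omega
            · omega

theorem pvB_inv_aux (l : List Int) : ∀ (p : List Int) (st : Option Int × Option Int),
    pvInvB p st → pvInvB (p ++ l) (l.foldl pvStepB st) := by
  induction l with
  | nil => intro p st h; simpa using h
  | cons v t ih =>
    intro p st h
    have := ih (p ++ [v]) (pvStepB st v) (pvStepB_inv p v st h)
    simpa using this

theorem pvB_fold_inv (l : List Int) :
    pvInvB l (l.foldl
      (fun (s : Option Int × Option Int) v =>
        match s with
        | (none, _) => (some v, none)
        | (some m, second) =>
          if m < v then (some v, some m)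
          else if v < m && (match second with | none => true | some s2 => s2 < v) then
            (some m, some v)
          else (some m, second))
      (none, none)) := by
  have : (fun (s : Option Int × Option Int) v =>
      match s with
      | (none, _) => (some v, none)
      | (some m, second) =>
        if m < v then (some v, some m)
        else if v < m && (match second with | none => true | some s2 => s2 < v) then
          (some m, some v)
        else (some m, second)) = pvStepB := rfl
  rw [this]
  simpa using pvB_inv_aux l [] (none, none) (by simp [pvInvB])

-- A's index loop rewrites every max_value into second_max_value, left to right;
-- positions not yet visited still hold their original values, so it is the map.
theorem pvLoop_aux (M S : Int) (l : List Int) (k : Nat) (hk : k ≤ l.length) :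
    (PySem.List.pyRange 0 (k : Int) 1).foldl
      (fun acc index =>
        if PySem.List.pyGetD acc index 0 == M then acc.set index.toNat S else acc) l
    = (l.take k).map (fun v => if v == M then S else v) ++ l.drop k := by
  induction k with
  | zero => simp [PySem.List.pyRange_one_eq_nil]
  | succ k ih =>
    have hk' : k < l.length := by omega
    have hcast : ((k + 1 : Nat) : Int) = (k : Int) + 1 := by push_cast; ring
    rw [hcast, PySem.List.pyRange_one_succ_right (by positivity), List.foldl_append,
      ih (by omega)]
    set f : Int → Int := fun v => if v == M then S else v with hf
    have hlen : ((l.take k).map f).length = k := by simp [List.length_take]; omega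
    have hget : PySem.List.pyGetD ((l.take k).map f ++ l.drop k) (k : Int) 0 = l[k] := by
      rw [PySem.List.pyGetD_natCast]
      rw [List.getD_eq_getElem?_getD, List.getElem?_append_right (by omega)]
      rw [hlen, Nat.sub_self]
      simp [hk']
    simp only [List.foldl_cons, List.foldl_nil, hget]
    have hdrop : l.drop k = l[k] :: l.drop (k + 1) := List.drop_eq_getElem_cons hk'
    by_cases hMk : l[k] = M
    · simp only [hMk, BEq.rfl, if_true, Int.toNat_natCast]
      rw [List.set_append, if_neg (by omega), hlen, Nat.sub_self, hdrop,
        ← List.take_concat_get hk']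
      simp [hf, hMk]
    · have hne : (l[k] == M) = false := by simp [hMk]
      rw [hne]
      simp only [Bool.false_eq_true, if_false]
      conv_lhs => rw [List.drop_eq_getElem_cons hk']
      conv_rhs => rw [← List.take_concat_get hk']
      rw [List.concat_eq_append, List.map_append]
      simp only [List.map_cons, List.map_nil, List.append_assoc, List.cons_append,
        List.nil_append]
      rw [show f l[k] = l[k] from by simp [hf, hMk]]

theorem pvLoop_eq_map (M S : Int) (l : List Int) :
    (PySem.List.pyRange 0 (l.length : Int) 1).foldl
      (fun acc index =>
        if PySem.List.pyGetD acc index 0 == M then acc.set index.toNat S else acc) l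
    = l.map (fun v => if v == M then S else v) := by
  simpa using pvLoop_aux M S l l.length le_rfl

-- max? with identity key returns (the value of) the maximum
theorem pvMax_val {l : List Int} {m : Int} (hm : m ∈ l) (hle : ∀ x ∈ l, x ≤ m) :
    (PySem.List.max? l (fun v => v)).getD 0 = m := by
  obtain ⟨v, hv⟩ : ∃ v, PySem.List.max? l (fun v => v) = some v := by
    cases h : PySem.List.max? l (fun v => v) with
    | none => rw [PySem.List.max?_eq_none_iff] at h; subst h; simp at hm
    | some v => exact ⟨v, rfl⟩
  have h1 : v ≤ m := hle v (PySem.List.max?_mem hv)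
  have h2 : m ≤ v := PySem.List.max?_isMax hv m hm
  rw [hv]; simp; omega

-- ===== VERDICT (by name: the statement is the Claim_ definition above) =====
theorem trim_list_spec : Claim_equal_trim_list := by
  intro l _
  unfold Spec_trim_list trim_list trim_list_alt
  have hinv := pvB_fold_inv l
  cases l with
  | nil => rfl
  | cons a t =>
    simp only [List.foldl_cons, if_true] at *
    rw [pvA_fold_char t a]
    set stB := (t.foldl
      (fun (s : Option Int × Option Int) v =>
        match s with
        | (none, _) => (some v, none)
        | (some m, second) =>
          if m < v then (some v, some m)
          else if v < m && (match second with | none => true | some s2 => s2 < v) then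
            (some m, some v)
          else (some m, second))
      (some a, none)) with hstB
    by_cases hsame : ∀ x ∈ t, x = a
    · -- all equal: both return the list unchanged
      have h2none : stB.2 = none := by
        obtain ⟨m1, s1⟩ := stB
        cases s1 with
        | none => rfl
        | some s =>
          cases m1 with
          | none => exact absurd hinv (by simp [pvInvB])
          | some m =>
            obtain ⟨hm, hs, hsm, hle, _⟩ := hinv
            rcases List.mem_cons.1 hm with hm | hm <;> rcases List.mem_cons.1 hs with hs | hs <;>
              first
              | (exfalso; omega)
              | (exfalso; have := hsame _ ‹_›; omega)
              | (exfalso; have h1 := hsame _ hm; have h2 := hsame _ hs; omega)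
      rw [if_pos (by simpa using hsame)]
      obtain ⟨m1, s1⟩ := stB
      cases s1 with
      | none => rfl
      | some s => exact absurd h2none (by simp)
    · -- not all equal
      rw [if_neg (by simpa using hsame)]
      obtain ⟨m1, s1⟩ := stB
      cases m1 with
      | none =>
        cases s1 with
        | none => exact absurd hinv (by simp [pvInvB])
        | some s => exact hinv.elim
      | some m =>
        cases s1 with
        | none =>
          obtain ⟨-, hall⟩ := hinv
          exact absurd (fun x hx => by have h1 := hall x (by simp [hx]); have h2 := hall a (by simp); omega) hsame
        | some s =>
          obtain ⟨hm, hs, hsm, hle, hsec⟩ := hinv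
          have hMv : (PySem.List.max? (a :: t) (fun v => v)).getD 0 = m := pvMax_val hm hle
          have hSv : (PySem.List.max? ((a :: t).filter (fun value => value != m)) (fun v => v)).getD 0 = s := by
            apply pvMax_val
            · rw [List.mem_filter]; exact ⟨hs, by simp; omega⟩
            · intro x hx; rw [List.mem_filter] at hx
              exact hsec x hx.1 (by simpa using hx.2)
          simp only [hMv]
          rw [hSv, pvLoop_eq_map m s (a :: t)]
          rfl
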